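-- pv_equiv track=rewrite | github.com/Maranion/Diplomna | mysite/crypto_investment_simulator/csv.py | yearly_data
-- ===== SOURCE A (Python) =====
-- def yearly_data(csv_reader):
--     x = 0
--     rows = []
--     for row in csv_reader:
--         if x%10 == 0 and x <= 365:
--             rows.append(row)
--         x += 1
--
--     return rows
-- ===== SOURCE B (Python) =====
-- def yearly_data(csv_reader):
--     rows = list(csv_reader)
--     return rows[0:366:10]
-- ===== Notes on version B (the rewrite author's own statement) =====
-- stated objective: simpler
-- what changed: Replaces the per-row counter-and-modulo filtering loop with materializing the iterator once and taking the closed-form strided slice rows[0:366:10] (indices 0,10,...,360).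
import Mathlib
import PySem

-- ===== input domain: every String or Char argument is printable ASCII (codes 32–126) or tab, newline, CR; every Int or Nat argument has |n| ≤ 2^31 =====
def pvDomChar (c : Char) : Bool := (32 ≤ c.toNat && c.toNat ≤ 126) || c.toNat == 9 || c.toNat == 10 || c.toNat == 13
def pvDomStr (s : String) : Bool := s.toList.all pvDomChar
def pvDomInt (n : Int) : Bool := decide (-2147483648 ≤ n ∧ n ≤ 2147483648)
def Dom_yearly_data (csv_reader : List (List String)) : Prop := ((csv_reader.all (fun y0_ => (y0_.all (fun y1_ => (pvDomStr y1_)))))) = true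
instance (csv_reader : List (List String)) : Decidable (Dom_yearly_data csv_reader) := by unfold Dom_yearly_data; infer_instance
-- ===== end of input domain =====

-- ===== PORT A =====
-- B materializes the iterator and takes the strided slice rows[0:366:10] instead of A's
-- counter-and-modulo filtering loop; return values proved equal (objective: simpler).
-- Note: '%' on Int in Lean agrees with Python '%' here because the divisor 10 is positive.
def yearly_data_go (x : Int) (rows : List (List String)) : List (List String) → List (List String)
  | [] => rows
  | row :: rest =>
      yearly_data_go (x + 1) (if x % 10 = 0 ∧ x ≤ 365 then rows ++ [row] else rows) rest

def yearly_data (csv_reader : List (List String)) : List (List String) :=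
  yearly_data_go 0 [] csv_reader

-- ===== PORT B =====
-- Hand port of the extended slice rows[0:366:10] (PySem.List.slice has no step):
-- exact for a nonnegative start, stop 366 and step 10: take the head, then skip 9.
def stride10 : List (List String) → List (List String)
  | [] => []
  | a :: rest => a :: stride10 (rest.drop 9)
termination_by l => l.length
decreasing_by simp

def yearly_data_alt (csv_reader : List (List String)) : List (List String) :=
  stride10 (csv_reader.take 366)

-- ===== PRECONDITION & SPEC =====
def Spec_yearly_data (csv_reader : List (List String)) (out : List (List String)) : Prop := out = yearly_data_alt csv_reader
instance (csv_reader : List (List String)) (out : List (List String)) : Decidable (Spec_yearly_data csv_reader out) := by unfold Spec_yearly_data; infer_instance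

-- ===== CLAIM (what is proved, stated in full; the proofs are below) =====
def Claim_equal_yearly_data : Prop := ∀ (csv_reader : List (List String)), Dom_yearly_data csv_reader → Spec_yearly_data csv_reader (yearly_data csv_reader)

-- ===== LEMMAS AND PROOFS =====

theorem stride10_nil : stride10 [] = [] := by rw [stride10]

theorem stride10_cons (a : List String) (rest : List (List String)) :
    stride10 (a :: rest) = a :: stride10 (rest.drop 9) := by rw [stride10]

-- pick n l : A's loop with a Nat counter starting at n and an empty accumulator
def pick (n : Nat) : List (List String) → List (List String)
  | [] => []
  | a :: rest => if n % 10 = 0 ∧ n ≤ 365 then a :: pick (n + 1) rest else pick (n + 1) rest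

theorem go_eq_pick : ∀ (l : List (List String)) (n : Nat) (rows : List (List String)),
    yearly_data_go (n : Int) rows l = rows ++ pick n l := by
  intro l
  induction l with
  | nil => intro n rows; simp [yearly_data_go, pick]
  | cons a rest ih =>
      intro n rows
      have hmod : ((n : Int) % 10 = 0 ∧ (n : Int) ≤ 365) ↔ (n % 10 = 0 ∧ n ≤ 365) := by
        constructor <;> intro h <;> refine ⟨?_, ?_⟩ <;> omega
      by_cases h : n % 10 = 0 ∧ n ≤ 365
      · have : yearly_data_go (n : Int) rows (a :: rest)
            = yearly_data_go ((n : Int) + 1) (rows ++ [a]) rest := by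
          simp [yearly_data_go, hmod.mpr h]
        rw [this]
        have := ih (n + 1) (rows ++ [a])
        push_cast at this
        rw [this]
        simp [pick, h]
      · have : yearly_data_go (n : Int) rows (a :: rest)
            = yearly_data_go ((n : Int) + 1) rows rest := by
          simp only [yearly_data_go]
          rw [if_neg (fun hc => h (hmod.mp hc))]
        rw [this]
        have := ih (n + 1) rows
        push_cast at this
        rw [this]
        simp [pick, h]

theorem pick_dead : ∀ (l : List (List String)) (n : Nat), 361 ≤ n → pick n l = [] := by
  intro l
  induction l with
  | nil => intro n _; simp [pick]
  | cons a rest ih =>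
      intro n hn
      have h : ¬ (n % 10 = 0 ∧ n ≤ 365) := by omega
      simp [pick, h, ih (n + 1) (by omega)]

theorem pick_skip : ∀ (m : Nat) (l : List (List String)) (n : Nat),
    (∀ j, j < m → (n + j) % 10 ≠ 0) → pick n l = pick (n + m) (l.drop m) := by
  intro m
  induction m with
  | zero => intro l n _; simp
  | succ m ih =>
      intro l n h
      cases l with
      | nil => simp [pick, List.drop_nil]
      | cons a rest =>
          have h0 : ¬ (n % 10 = 0 ∧ n ≤ 365) := fun hc => h 0 (by omega) (by simpa using hc.1)
          have := ih rest (n + 1) (fun j hj => by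
            have := h (j + 1) (by omega)
            omega)
          simp only [pick, if_neg h0]
          rw [this]
          have : n + 1 + m = n + (m + 1) := by omega
          simp [this]

theorem pick_mult : ∀ (k : Nat) (l : List (List String)) (n : Nat), l.length ≤ k →
    n % 10 = 0 → n ≤ 360 → pick n l = stride10 (l.take (366 - n)) := by
  intro k
  induction k with
  | zero =>
      intro l n hl _ _
      have : l = [] := List.eq_nil_of_length_eq_zero (by omega)
      subst this; simp [pick, stride10_nil]
  | succ k ih =>
      intro l n hl hmod hle
      cases l with
      | nil => simp [pick, stride10_nil]
      | cons a rest =>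
          have hc : n % 10 = 0 ∧ n ≤ 365 := ⟨hmod, by omega⟩
          have htake : (a :: rest).take (366 - n) = a :: rest.take (365 - n) := by
            have : 366 - n = (365 - n) + 1 := by omega
            simp [this]
          rw [htake]
          simp only [pick, if_pos hc, stride10_cons]
          congr 1
          have hskip : pick (n + 1) rest = pick (n + 10) (rest.drop 9) := by
            have := pick_skip 9 rest (n + 1) (fun j hj => by omega)
            simpa [Nat.add_assoc] using this
          rw [hskip, List.drop_take]

          by_cases h360 : n = 360
          · subst h360
            have : (365 - 360 - 9 : Nat) = 0 := by omega
            simp [this, pick_dead (rest.drop 9) 370 (by omega), stride10]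
          · have h350 : n + 10 ≤ 360 := by omega
            have := ih (rest.drop 9) (n + 10)
              (by have := List.length_drop (l := rest) (i := 9); simp at hl ⊢; omega)
              (by omega) h350
            rw [this]
            congr 2
            omega

-- ===== VERDICT (by name: the statement is the Claim_ definition above) =====
theorem yearly_data_spec : Claim_equal_yearly_data := by
  intro csv_reader _
  unfold Spec_yearly_data yearly_data yearly_data_alt
  have h0 : (0 : Int) = ((0 : Nat) : Int) := by norm_num
  rw [h0, go_eq_pick, pick_mult csv_reader.length csv_reader 0 (le_refl _) (by norm_num) (by norm_num)]
  simp
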